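-- pv_equiv track=rewrite | github.com/twbeatles/Scraping-flight-information | config.py | _extract_airport_code
-- ===== SOURCE A (Python) =====
-- from typing import Dict, List, Any
--
-- def _extract_airport_code(value: Any) -> str:
--     text = str(value or "").strip().upper()
--     if not text:
--         return ""
--     if validate_airport_code(text):
--         return text
--
--     code_chars: list[str] = []
--     for ch in text:
--         if ch.isascii() and ch.isalpha():
--             code_chars.append(ch)
--             if len(code_chars) == 3:
--                 break
--         elif code_chars:
--             break
--     candidate = "".join(code_chars)
--     return candidate if validate_airport_code(candidate) else candidate
--
-- def validate_airport_code(code: str) -> bool: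
--     """공항/도시 코드 유효성 검사 (3자리 영문)"""
--     if not code:
--         return False
--     normalized = code.strip().upper()
--     return len(normalized) == 3 and normalized.isalpha() and normalized.isascii()
-- ===== SOURCE B (Python) =====
-- def _extract_airport_code(value):
--     text = str(value or "").strip().upper()
--     is_letter = lambda ch: ch.isascii() and ch.isalpha()
--     rest = text
--     while rest and not is_letter(rest[0]):
--         rest = rest[1:]
--     code = ""
--     while rest and len(code) < 3 and is_letter(rest[0]):
--         code += rest[0]
--         rest = rest[1:]
--     return code
-- ===== Notes on version B (the rewrite author's own statement) =====
-- stated objective: simpler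
-- what changed: Replaces A's early validate_airport_code shortcut, stateful accumulate-and-break scan and final no-op validate ternary with two plain phases: skip leading non-letters, then take up to 3 consecutive ASCII letters.
import Mathlib
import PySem

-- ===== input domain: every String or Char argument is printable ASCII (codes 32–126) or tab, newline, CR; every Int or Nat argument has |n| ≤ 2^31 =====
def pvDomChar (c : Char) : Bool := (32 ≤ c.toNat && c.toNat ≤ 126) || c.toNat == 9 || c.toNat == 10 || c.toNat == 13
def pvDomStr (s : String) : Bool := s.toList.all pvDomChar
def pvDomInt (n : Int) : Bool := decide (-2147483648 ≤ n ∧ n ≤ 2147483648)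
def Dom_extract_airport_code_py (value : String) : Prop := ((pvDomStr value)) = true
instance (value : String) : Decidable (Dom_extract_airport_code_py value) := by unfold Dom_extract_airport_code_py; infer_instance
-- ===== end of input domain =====

-- B replaces A's validate shortcut + accumulate-and-break scan + no-op final validate with two
-- plain phases (skip non-letters, then take up to 3 letters); objective: simpler, same cost.

-- ===== PORT A =====

-- ch.isascii() and ch.isalpha(); isascii ported by hand as codepoint ≤ 127 (exact);
-- PySem.Chars.isalpha is exact on the ASCII domain
def pvIsLetterA (c : Char) : Bool := (c.toNat ≤ 127) && PySem.Chars.isalpha c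

-- validate_airport_code (helper of A)
def validate_airport_code_port (code : String) : Bool :=
  if code = "" then false
  else
    let normalized := PySem.Str.upper (PySem.Str.strip code)
    (PySem.Str.len normalized == 3) && PySem.Str.strIsalpha normalized
      && normalized.toList.all (fun c => c.toNat ≤ 127)   -- .isascii(), by hand (exact)

-- the for-loop over text with code_chars and the two breaks
def pvALoop : List Char → List Char → List Char
  | [], acc => acc
  | c :: rest, acc =>
    if pvIsLetterA c then
      let acc' := acc ++ [c]
      if acc'.length == 3 then acc' else pvALoop rest acc'
    else if !acc.isEmpty then acc else pvALoop rest acc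

def extract_airport_code_py (value : String) : String :=
  let text := PySem.Str.upper (PySem.Str.strip value)  -- str(value or "") is the identity on a str
  if text = "" then ""
  else if validate_airport_code_port text then text
  else
    let candidate := String.ofList (pvALoop text.toList [])
    if validate_airport_code_port candidate then candidate else candidate

-- ===== PORT B =====

-- is_letter in Source B: ch.isascii() and ch.isalpha()
def pvIsLetterB (c : Char) : Bool := (c.toNat ≤ 127) && PySem.Chars.isalpha c

-- first while loop: drop leading non-letters
def pvBSkip : List Char → List Char
  | [] => []
  | c :: rest => if !pvIsLetterB c then pvBSkip rest else c :: rest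

-- second while loop: append letters into code while len(code) < 3
def pvBTake : List Char → List Char → List Char
  | code, [] => code
  | code, c :: rest =>
    if code.length < 3 && pvIsLetterB c then pvBTake (code ++ [c]) rest else code

def extract_airport_code_py_alt (value : String) : String :=
  let text := PySem.Str.upper (PySem.Str.strip value)
  String.ofList (pvBTake [] (pvBSkip text.toList))

-- ===== PRECONDITION & SPEC =====
def Spec_extract_airport_code_py (value : String) (out : String) : Prop := out = extract_airport_code_py_alt value
instance (value : String) (out : String) : Decidable (Spec_extract_airport_code_py value out) := by unfold Spec_extract_airport_code_py; infer_instance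

-- ===== CLAIM (what is proved, stated in full; the proofs are below) =====
def Claim_equal_extract_airport_code_py : Prop := ∀ (value : String), Dom_extract_airport_code_py value → Spec_extract_airport_code_py value (extract_airport_code_py value)

-- ===== LEMMAS AND PROOFS =====

theorem pvLetter_AB (c : Char) : pvIsLetterA c = pvIsLetterB c := rfl

-- once pvBTake's code has length 3 it stops immediately
theorem pvBTake_full (rest code : List Char) (h : ¬ code.length < 3) :
    pvBTake code rest = code := by
  cases rest with
  | nil => rfl
  | cons c r => simp [pvBTake, h]

-- phase 2: with a nonempty, short accumulator the two loops agree
theorem pvPhase2 (rest : List Char) : ∀ acc : List Char, acc.length < 3 → ¬ acc.isEmpty →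
    pvALoop rest acc = pvBTake acc rest := by
  induction rest with
  | nil => intro acc _ _; rfl
  | cons c r ih =>
    intro acc hlen hne
    by_cases hc : pvIsLetterA c
    · simp only [pvALoop, pvBTake, hc, ← pvLetter_AB, hlen, if_true, Bool.and_true,
        decide_true]
      by_cases h3 : (acc ++ [c]).length = 3
      · simp only [h3, beq_self_eq_true, if_true]
        rw [pvBTake_full _ _ (by omega)]
      · have : ((acc ++ [c]).length == 3) = false := by simpa using h3
        simp only [this, Bool.false_eq_true, if_false]
        exact ih (acc ++ [c]) (by simp at h3 ⊢; omega) (by simp)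
    · have hc' : pvIsLetterB c = false := by rw [← pvLetter_AB]; simpa using hc
      simp [pvALoop, pvBTake, hc', hne, pvLetter_AB]

-- the whole scans agree
theorem pvScan_eq (L : List Char) : pvALoop L [] = pvBTake [] (pvBSkip L) := by
  induction L with
  | nil => rfl
  | cons c r ih =>
    by_cases hc : pvIsLetterA c
    · simp only [pvALoop, pvBSkip, ← pvLetter_AB, hc, Bool.not_true, Bool.false_eq_true,
        if_false, if_true, List.nil_append, List.length_singleton]
      simp only [pvBTake, ← pvLetter_AB, hc, Bool.and_true, decide_true, List.nil_append,
        show (0:Nat) < 3 by omega, List.length_nil]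
      exact pvPhase2 r [c] (by simp) (by simp)
    · have hc' : pvIsLetterA c = false := by simpa using hc
      simp [pvALoop, pvBSkip, hc', ← pvLetter_AB, ih]

-- whitespace is untouched by upperChar
theorem pvIsspace_upperChar (c : Char) :
    PySem.Chars.isspace (PySem.Chars.upperChar c) = PySem.Chars.isspace c := by
  by_cases h : PySem.Chars.islower c
  · have hlo : 'a' ≤ c ∧ c ≤ 'z' := by simpa [PySem.Chars.islower] using h
    have hb : 97 ≤ c.toNat ∧ c.toNat ≤ 122 := by
      exact ⟨hlo.1, hlo.2⟩
    simp only [PySem.Chars.upperChar, h, if_true]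
    have h1 : (Char.ofNat (c.toNat - 32)).toNat = c.toNat - 32 := by
      have hv : (c.toNat - 32).isValidChar := Or.inl (by omega)
      simp only [Char.ofNat, hv, dif_pos]; rfl
    have hc1 := hb.1; have hc2 := hb.2
    have hx1 : PySem.Chars.isspace (Char.ofNat (c.toNat - 32)) = false := by
      simp only [PySem.Chars.isspace, h1, Bool.or_eq_false_iff, Bool.and_eq_false_iff,
        decide_eq_false_iff_not]
      omega
    have hx2 : PySem.Chars.isspace c = false := by
      simp only [PySem.Chars.isspace, Bool.or_eq_false_iff, Bool.and_eq_false_iff,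
        decide_eq_false_iff_not]
      omega
    rw [hx1, hx2]
  · have h' : PySem.Chars.islower c = false := by simpa using h
    simp [PySem.Chars.upperChar, h']

theorem pvUpperChar_upperChar (c : Char) :
    PySem.Chars.upperChar (PySem.Chars.upperChar c) = PySem.Chars.upperChar c := by
  by_cases h : PySem.Chars.islower c
  · have hlo : 'a' ≤ c ∧ c ≤ 'z' := by simpa [PySem.Chars.islower] using h
    have hb : 97 ≤ c.toNat ∧ c.toNat ≤ 122 := ⟨hlo.1, hlo.2⟩
    simp only [PySem.Chars.upperChar, h, if_true]
    have h1 : (Char.ofNat (c.toNat - 32)).toNat = c.toNat - 32 := by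
      have hv : (c.toNat - 32).isValidChar := Or.inl (by omega)
      simp only [Char.ofNat, hv, dif_pos]; rfl
    have : PySem.Chars.islower (Char.ofNat (c.toNat - 32)) = false := by
      simp only [PySem.Chars.islower, Bool.and_eq_false_iff]
      left
      simp only [decide_eq_false_iff_not, not_le]
      have : (Char.ofNat (c.toNat - 32)).toNat < ('a' : Char).toNat := by
        rw [h1]; show c.toNat - 32 < 97; omega
      exact Char.lt_def.mpr this
    simp [this]
  · have h' : PySem.Chars.islower c = false := by simpa using h
    simp [PySem.Chars.upperChar, h']

-- strip commutes with upper
theorem pvStrip_upper (l : List Char) :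
    PySem.Chars.strip (PySem.Chars.upper l) = PySem.Chars.upper (PySem.Chars.strip l) := by
  simp only [PySem.Chars.strip, PySem.Chars.lstrip, PySem.Chars.rstrip, PySem.Chars.upper]
  rw [List.dropWhile_map]
  have hcomp : (PySem.Chars.isspace ∘ PySem.Chars.upperChar) = PySem.Chars.isspace := by
    funext c; exact pvIsspace_upperChar c
  rw [hcomp, ← List.map_reverse, List.dropWhile_map, hcomp, ← List.map_reverse]

-- head of a dropWhile never satisfies the predicate
theorem pvHead_dropWhile (p : Char → Bool) (l : List Char) :
    ∀ c, (l.dropWhile p).head? = some c → p c = false := by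
  induction l with
  | nil => simp
  | cons a t ih =>
    intro c h
    by_cases hp : p a
    · simp only [List.dropWhile, hp] at h
      exact ih c h
    · simp only [List.dropWhile, hp, List.head?_cons, Option.some.injEq] at h
      subst h; simpa using hp
  -- (cases on whether the head is dropped)

theorem pvDropWhile_of_head (p : Char → Bool) (l : List Char)
    (h : ∀ c, l.head? = some c → p c = false) : l.dropWhile p = l := by
  cases l with
  | nil => rfl
  | cons a t => simp [List.dropWhile, h a rfl]

-- strip is idempotent
theorem pvStrip_strip (l : List Char) :
    PySem.Chars.strip (PySem.Chars.strip l) = PySem.Chars.strip l := by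
  simp only [PySem.Chars.strip, PySem.Chars.lstrip, PySem.Chars.rstrip]
  set p := PySem.Chars.isspace
  set t := l.dropWhile p with ht
  -- rstrip t is a prefix of t, so its head also fails p
  have hpre : ((t.reverse.dropWhile p).reverse : List Char) <+: t := by
    have hsuf : (t.reverse.dropWhile p) <:+ t.reverse := List.dropWhile_suffix p
    simpa using hsuf.reverse
  have hhead : ∀ c, ((t.reverse.dropWhile p).reverse).head? = some c → p c = false := by
    intro c hc
    have hne : ((t.reverse.dropWhile p).reverse) ≠ [] := by
      intro h; rw [h] at hc; simp at hc
    have : t.head? = some c := by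
      obtain ⟨u, hu⟩ := hpre
      cases h' : (t.reverse.dropWhile p).reverse with
      | nil => exact absurd h' hne
      | cons x xs =>
        rw [h'] at hc hu
        simp at hc
        rw [← hu, hc]; rfl
    exact pvHead_dropWhile p l c (ht ▸ this)
  rw [pvDropWhile_of_head p _ hhead]
  congr 1
  rw [List.reverse_reverse]
  exact pvDropWhile_of_head p _ (fun c hc => pvHead_dropWhile p t.reverse c hc)

-- upper is idempotent
theorem pvUpper_upper (l : List Char) :
    PySem.Chars.upper (PySem.Chars.upper l) = PySem.Chars.upper l := by
  simp only [PySem.Chars.upper, List.map_map]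
  congr 1
  funext c
  exact pvUpperChar_upperChar c

-- when the early validate fires, text is exactly three ASCII letters and B's scan returns it
theorem pvValid_case (text : String)
    (hv : validate_airport_code_port text = true)
    (htext : ∃ v : List Char, text.toList = PySem.Chars.upper (PySem.Chars.strip v)) :
    String.ofList (pvBTake [] (pvBSkip text.toList)) = text := by
  obtain ⟨v, hveq⟩ := htext
  -- normalized = text
  have hnorm : (PySem.Str.upper (PySem.Str.strip text)).toList = text.toList := by
    rw [PySem.Str.toList_upper, PySem.Str.toList_strip, hveq, pvStrip_upper, pvStrip_strip,
      pvUpper_upper]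
  unfold validate_airport_code_port at hv
  split at hv
  · exact absurd hv (by simp)
  · simp only [Bool.and_eq_true, beq_iff_eq, List.all_eq_true] at hv
    obtain ⟨⟨hlen, halpha⟩, hascii⟩ := hv
    have hlen' : text.toList.length = 3 := by
      have h := hlen
      rw [PySem.Str.len_eq, hnorm] at h
      exact_mod_cast h
    have halpha' : ∀ c ∈ text.toList, PySem.Chars.isalpha c = true := by
      have := halpha
      rw [PySem.Str.strIsalpha_eq, PySem.Chars.strIsalpha, hnorm] at this
      simp only [Bool.and_eq_true, List.all_eq_true] at this
      exact fun c hc => this.2 c hc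
    have hascii' : ∀ c ∈ text.toList, c.toNat ≤ 127 := by
      intro c hc
      have := hascii c (by rwa [hnorm])
      simpa using this
    obtain ⟨a, b, c, habc⟩ := List.length_eq_three.mp hlen'
    have hla : pvIsLetterB a = true := by
      simp [pvIsLetterB, halpha' a (by simp [habc]), hascii' a (by simp [habc])]
    have hlb : pvIsLetterB b = true := by
      simp [pvIsLetterB, halpha' b (by simp [habc]), hascii' b (by simp [habc])]
    have hlc : pvIsLetterB c = true := by
      simp [pvIsLetterB, halpha' c (by simp [habc]), hascii' c (by simp [habc])]
    rw [habc]
    simp only [pvBSkip, hla, Bool.not_true, Bool.false_eq_true, if_false]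
    simp only [pvBTake, hla, hlb, hlc, List.length_nil, List.nil_append, List.length_cons, Bool.and_true]
    norm_num
    conv_lhs => rw [← habc]
    exact String.ofList_toList

-- ===== VERDICT (by name: the statement is the Claim_ definition above) =====
theorem extract_airport_code_py_spec : Claim_equal_extract_airport_code_py := by
  intro value _
  unfold Spec_extract_airport_code_py extract_airport_code_py extract_airport_code_py_alt
  set text := PySem.Str.upper (PySem.Str.strip value) with htext
  by_cases he : text = ""
  · simp only [he, if_true]
    rfl
  · simp only [he, if_false]
    by_cases hv : validate_airport_code_port text = true
    · simp only [hv, if_true]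
      exact (pvValid_case text hv ⟨value.toList, by
        rw [htext, PySem.Str.toList_upper, PySem.Str.toList_strip]⟩).symm
    · simp only [hv, Bool.false_eq_true, if_false]
      rw [pvScan_eq]
      split <;> rfl
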